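-- pv_equiv track=rewrite | github.com/senikim/Algorithm_test | 프로그래머스/unrated/176963. 추억 점수/추억 점수.py | solution
-- ===== SOURCE A (Python) =====
-- def solution(name, yearning, photo):
--     answer = []
--     score = {}
--     final_score = 0
--     for i in range(len(name)):
--         score[name[i]] = yearning[i]
--     for g in photo:
--       for n in range(len(g)):
--         final_score += score[g[n]]
--       answer.append(final_score)
--     return answer
-- ===== SOURCE B (Python) =====
-- def _accumulate(per, t):
--     if not per:
--         return []
--     t += per[0]
--     return [t] + _accumulate(per[1:], t)
--
--
-- def solution(name, yearning, photo):
--     score = dict(zip(name, yearning))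
--     per = [sum(score[n] for n in g) for g in photo]
--     return _accumulate(per, 0)
-- ===== Notes on version B (the rewrite author's own statement) =====
-- stated objective: simpler
-- what changed: Builds the score map with dict(zip(...)) instead of an index loop, computes independent per-photo totals with a comprehension, and turns them into the cumulative answer with a separate recursive accumulate, removing the threaded running-sum from the nested loops.
import Mathlib
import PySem

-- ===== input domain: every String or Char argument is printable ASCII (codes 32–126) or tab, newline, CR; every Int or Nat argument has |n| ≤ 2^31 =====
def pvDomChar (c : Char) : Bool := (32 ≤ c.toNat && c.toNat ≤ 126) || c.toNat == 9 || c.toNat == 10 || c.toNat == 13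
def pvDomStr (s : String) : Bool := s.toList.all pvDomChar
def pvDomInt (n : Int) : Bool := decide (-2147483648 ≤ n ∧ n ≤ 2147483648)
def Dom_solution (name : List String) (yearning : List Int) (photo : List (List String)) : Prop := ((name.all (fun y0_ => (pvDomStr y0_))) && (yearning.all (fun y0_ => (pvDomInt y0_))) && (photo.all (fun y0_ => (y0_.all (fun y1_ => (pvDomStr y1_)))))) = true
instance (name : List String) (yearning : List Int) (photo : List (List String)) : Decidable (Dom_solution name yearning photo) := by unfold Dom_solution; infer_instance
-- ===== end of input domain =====

-- B separates the work into: a dict built from zip, independent per-photo totals, and a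
-- recursive cumulative accumulate (the running sum is never reset, matching A).

-- ===== PORT A =====
def solution (name : List String) (yearning : List Int) (photo : List (List String)) : List Int :=
  let score := (PySem.List.pyRange 0 (name.length : Int) 1).foldl
      (fun (d : PySem.Dict String Int) i =>
        d.insert (PySem.List.pyGetD name i "") (PySem.List.pyGetD yearning i 0)) PySem.Dict.empty
  let res := photo.foldl (fun (p : List Int × Int) g =>
      let fs := (PySem.List.pyRange 0 (g.length : Int) 1).foldl
          (fun s n => s + score.getD (PySem.List.pyGetD g n "") 0) p.2
      (p.1 ++ [fs], fs)) ([], 0)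
  res.1

-- ===== PORT B =====
-- _accumulate(per, t): recursive cumulative sums
def pvAccumulate : List Int → Int → List Int
  | [], _ => []
  | x :: xs, t => (t + x) :: pvAccumulate xs (t + x)

def solution_alt (name : List String) (yearning : List Int) (photo : List (List String)) : List Int :=
  let score := (name.zip yearning).foldl
      (fun (d : PySem.Dict String Int) p => d.insert p.1 p.2) PySem.Dict.empty
  let per := photo.map (fun g => (g.map (fun n => score.getD n 0)).sum)
  pvAccumulate per 0

-- ===== PRECONDITION & SPEC =====
-- Pre_ excludes exactly the inputs where A raises: IndexError when name is longer than
-- yearning, and KeyError when a photo mentions a name absent from the score dict.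
def Pre_solution (name : List String) (yearning : List Int) (photo : List (List String)) : Prop :=
  name.length ≤ yearning.length ∧ ∀ g ∈ photo, ∀ n ∈ g, n ∈ name
instance (name : List String) (yearning : List Int) (photo : List (List String)) : Decidable (Pre_solution name yearning photo) := by unfold Pre_solution; infer_instance

def pvWitness_solution : List String × List Int × List (List String) :=
  (["a", "b"], [1, 2], [["a", "a"], ["b"], []])

def Spec_solution (name : List String) (yearning : List Int) (photo : List (List String)) (out : List Int) : Prop := out = solution_alt name yearning photo
instance (name : List String) (yearning : List Int) (photo : List (List String)) (out : List Int) : Decidable (Spec_solution name yearning photo out) := by unfold Spec_solution; infer_instance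

-- ===== CLAIM (what is proved, stated in full; the proofs are below) =====
def Claim_equal_solution : Prop := ∀ (name : List String) (yearning : List Int) (photo : List (List String)), Dom_solution name yearning photo → Pre_solution name yearning photo → Spec_solution name yearning photo (solution name yearning photo)

-- ===== LEMMAS AND PROOFS =====

-- A's index-loop dict equals B's zip-fold dict when yearning is long enough.
theorem pv_dict_eq (name : List String) (yearning : List Int)
    (h : name.length ≤ yearning.length) (d : PySem.Dict String Int) :
    (PySem.List.pyRange 0 (name.length : Int) 1).foldl
      (fun (d : PySem.Dict String Int) i =>
        d.insert (PySem.List.pyGetD name i "") (PySem.List.pyGetD yearning i 0)) d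
    = (name.zip yearning).foldl (fun (d : PySem.Dict String Int) p => d.insert p.1 p.2) d := by
  have hlen : ((name.zip yearning).length : Int) = (name.length : Int) := by
    simp [List.length_zip]; omega
  rw [← hlen,
      ← PySem.List.foldl_pyRange_zero_pyGetD' (name.zip yearning) ("", (0 : Int))
        (fun (d : PySem.Dict String Int) p => d.insert p.1 p.2) d]
  apply PySem.List.foldl_congr_mem
  intro acc i hi
  rw [PySem.List.mem_pyRange_one] at hi
  have hzlen : (name.zip yearning).length = name.length := by
    simp [List.length_zip]; omega
  obtain ⟨k, rfl⟩ : ∃ k : Nat, i = (k : Int) := ⟨i.toNat, by omega⟩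
  have hk : k < (name.zip yearning).length := by exact_mod_cast hi.2
  have hkn : k < name.length := by omega
  have hky : k < yearning.length := by omega
  simp only [PySem.List.pyGetD_natCast]
  rw [List.getD_eq_getElem _ _ hk, List.getD_eq_getElem _ _ hkn,
      List.getD_eq_getElem _ _ hky]
  simp [List.getElem_zip]

-- folding '+ f x' over xs from init is init plus the sum of the mapped list
theorem pv_foldl_add_sum (f : String → Int) :
    ∀ (xs : List String) (init : Int),
      xs.foldl (fun s n => s + f n) init = init + (xs.map f).sum := by
  intro xs
  induction xs with
  | nil => simp
  | cons x xs ih => intro init; simp [List.foldl_cons, ih]; ring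

-- A's outer threaded fold equals appending the recursive accumulate of per-photo totals
theorem pv_outer_eq (pv : List String → Int) :
    ∀ (l : List (List String)) (acc : List Int) (s : Int),
      (l.foldl (fun (p : List Int × Int) g => (p.1 ++ [p.2 + pv g], p.2 + pv g)) (acc, s)).1
      = acc ++ pvAccumulate (l.map pv) s := by
  intro l
  induction l with
  | nil => simp [pvAccumulate]
  | cons g l ih =>
      intro acc s
      simp only [List.foldl_cons, List.map_cons, pvAccumulate]
      rw [ih]
      simp

-- ===== VERDICT (by name: the statement is the Claim_ definition above) =====
theorem solution_spec : Claim_equal_solution := by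
  intro name yearning photo _ hpre
  unfold Spec_solution solution solution_alt
  simp only
  rw [pv_dict_eq name yearning hpre.1]
  set score := (name.zip yearning).foldl
      (fun (d : PySem.Dict String Int) p => d.insert p.1 p.2) PySem.Dict.empty with hscore
  have hbody : (fun (p : List Int × Int) g =>
      ((p.1 ++ [(PySem.List.pyRange 0 (g.length : Int) 1).foldl
          (fun s n => s + score.getD (PySem.List.pyGetD g n "") 0) p.2],
        (PySem.List.pyRange 0 (g.length : Int) 1).foldl
          (fun s n => s + score.getD (PySem.List.pyGetD g n "") 0) p.2) : List Int × Int))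
      = fun (p : List Int × Int) g =>
          (p.1 ++ [p.2 + (g.map (fun n => score.getD n 0)).sum],
           p.2 + (g.map (fun n => score.getD n 0)).sum) := by
    funext p g
    rw [PySem.List.foldl_pyRange_zero_pyGetD' g ""
        (fun s n => s + score.getD n 0) p.2]
    rw [pv_foldl_add_sum (fun n => score.getD n 0) g p.2]
  rw [hbody, pv_outer_eq (fun g => (g.map (fun n => score.getD n 0)).sum) photo [] 0]
  simp
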